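-- pv_equiv track=rewrite | github.com/GMicro-uPPG/SRMAC_peak_detector | ppg_peak_detection.py | literature_signal_confusion_matrix
-- ===== SOURCE A (Python) =====
-- def literature_signal_confusion_matrix(detected_locations, reference_locations):
--     """ The confusion (triangular) matrix defined in the literature considers if a peak was detected in the neighborhood of a reference peak, and has no definition of true negatives """
--
--     # running through the reference peaks one can extract true positives and false negatives
--     # false positives = all detected - true positives
--
--     # Sampling interval in seconds
--     T = 0.005
--     # Neighborhood definition in seconds
--     neighborhood_time = 0.1
--     # Neighborhood definition in number of samples
--     neighborhood_samples = int(neighborhood_time / T)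
--
--     true_positives = 0
--     false_positives = 0
--     false_negatives = 0
--
--     for reference in reference_locations:
--         # Detection of the reference peak is initially assumed to be false
--         correct_detection = False
--         for detected in detected_locations:
--             if detected > (reference - neighborhood_samples) and detected < (reference + neighborhood_samples):
--                 correct_detection = True
--
--         if correct_detection:
--             true_positives += 1
--         else:
--             false_negatives += 1
--
--     false_positives = len(detected_locations) - true_positives
--
--     return true_positives, false_positives, false_negatives
-- ===== SOURCE B (Python) =====
-- def literature_signal_confusion_matrix(detected_locations, reference_locations):
--     """Set-lookup reformulation: instead of scanning all detections per reference,
--     build a hash set of detections once and probe the 39 integer positions of each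
--     reference's open neighborhood (reference-20, reference+20)."""
--     neighborhood_samples = int(0.1 / 0.005)  # 20, as in the literature definition
--     detected_set = set(detected_locations)
--     true_positives = 0
--     for reference in reference_locations:
--         if any((reference + off) in detected_set
--                for off in range(1 - neighborhood_samples, neighborhood_samples)):
--             true_positives += 1
--     return (true_positives,
--             len(detected_locations) - true_positives,
--             len(reference_locations) - true_positives)
-- ===== Notes on version B (the rewrite author's own statement) =====
-- stated objective: faster
-- what changed: Replaces the nested scan of all detections for every reference by a hash set of detections built once and 39 constant-time membership probes per reference (the neighborhood has fixed width 39 samples); false negatives are computed as len(reference)-TP instead of being accumulated.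
import Mathlib
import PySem

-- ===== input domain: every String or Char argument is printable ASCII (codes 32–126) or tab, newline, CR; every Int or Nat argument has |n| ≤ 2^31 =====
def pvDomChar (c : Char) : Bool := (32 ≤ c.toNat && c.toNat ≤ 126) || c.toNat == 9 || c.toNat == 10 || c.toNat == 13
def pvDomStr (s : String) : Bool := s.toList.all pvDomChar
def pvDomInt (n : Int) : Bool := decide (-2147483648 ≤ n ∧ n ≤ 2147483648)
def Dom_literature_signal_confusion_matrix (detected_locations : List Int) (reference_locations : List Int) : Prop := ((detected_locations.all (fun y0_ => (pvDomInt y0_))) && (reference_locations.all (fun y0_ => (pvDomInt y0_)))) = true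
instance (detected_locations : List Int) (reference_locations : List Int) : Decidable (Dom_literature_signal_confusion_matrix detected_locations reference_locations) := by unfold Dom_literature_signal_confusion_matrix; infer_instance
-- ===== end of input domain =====

-- ===== PORT A =====
-- Port of A: nested loop over references and detections; return value only.
def literature_signal_confusion_matrix (detected_locations : List Int) (reference_locations : List Int) : Int × Int × Int :=
  let neighborhood_samples : Int := 20
  let st : Int × Int := reference_locations.foldl (fun (st : Int × Int) reference =>
      let correct_detection : Bool := detected_locations.foldl (fun c detected =>
          if detected > reference - neighborhood_samples && detected < reference + neighborhood_samples
          then true else c) false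
      if correct_detection then (st.1 + 1, st.2) else (st.1, st.2 + 1)) (0, 0)
  (st.1, (detected_locations.length : Int) - st.1, st.2)

-- ===== PORT B =====
-- Port of B: a set of detections built once, 39 membership probes per reference.
def literature_signal_confusion_matrix_alt (detected_locations : List Int) (reference_locations : List Int) : Int × Int × Int :=
  let neighborhood_samples : Int := 20
  let detected_set : PySem.Set Int := PySem.Set.ofList detected_locations
  let tp : Int := reference_locations.foldl (fun (tp : Int) reference =>
      if (PySem.List.pyRange (1 - neighborhood_samples) neighborhood_samples 1).any
           (fun off => PySem.Set.contains detected_set (reference + off))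
      then tp + 1 else tp) 0
  (tp, (detected_locations.length : Int) - tp, (reference_locations.length : Int) - tp)

-- ===== PRECONDITION & SPEC =====
def Spec_literature_signal_confusion_matrix (detected_locations : List Int) (reference_locations : List Int) (out : Int × Int × Int) : Prop := out = literature_signal_confusion_matrix_alt detected_locations reference_locations
instance (detected_locations : List Int) (reference_locations : List Int) (out : Int × Int × Int) : Decidable (Spec_literature_signal_confusion_matrix detected_locations reference_locations out) := by unfold Spec_literature_signal_confusion_matrix; infer_instance

-- ===== CLAIM (what is proved, stated in full; the proofs are below) =====
def Claim_equal_literature_signal_confusion_matrix : Prop := ∀ (detected_locations : List Int) (reference_locations : List Int), Dom_literature_signal_confusion_matrix detected_locations reference_locations → Spec_literature_signal_confusion_matrix detected_locations reference_locations (literature_signal_confusion_matrix detected_locations reference_locations)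

-- ===== LEMMAS AND PROOFS =====

-- A's inner loop is an `any` over the detections.
theorem innerA_eq_any (ds : List Int) (r : Int) (c : Bool) :
    ds.foldl (fun c d => if d > r - 20 && d < r + 20 then true else c) c
      = (c || ds.any (fun d => r - 20 < d && d < r + 20)) := by
  induction ds generalizing c with
  | nil => simp
  | cons d ds ih =>
    simp only [List.foldl_cons, List.any_cons, ih]
    by_cases h1 : r - 20 < d <;> by_cases h2 : d < r + 20 <;>
      simp [h1, h2]

-- a hit among the detections ↔ a hit among the 39 probed positions
theorem any_eq_probe (ds : List Int) (r : Int) :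
    ds.any (fun d => r - 20 < d && d < r + 20)
      = (PySem.List.pyRange (1 - 20) 20 1).any
          (fun off => PySem.Set.contains (PySem.Set.ofList ds) (r + off)) := by
  rw [Bool.eq_iff_iff]
  simp only [List.any_eq_true, PySem.List.mem_pyRange_one, PySem.Set.contains_iff,
    PySem.Set.mem_ofList, decide_eq_true_eq, Bool.and_eq_true]
  constructor
  · rintro ⟨d, hd, h1, h2⟩
    exact ⟨d - r, ⟨by omega, by omega⟩, by simpa using hd⟩
  · rintro ⟨off, ⟨h1, h2⟩, hm⟩
    exact ⟨r + off, hm, by omega, by omega⟩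

-- shifting B's accumulator
theorem foldB_shift (rs : List Int) (p : Int → Bool) (t : Int) :
    rs.foldl (fun t r => if p r then t + 1 else t) t
      = t + rs.foldl (fun t r => if p r then t + 1 else t) 0 := by
  induction rs generalizing t with
  | nil => simp
  | cons r rs ih =>
    simp only [List.foldl_cons]
    rw [ih, ih (if p r then (0:Int)+1 else 0)]
    split <;> ring

-- A's outer loop, expressed through B's counter
theorem outerA (rs : List Int) (p : Int → Bool) (t f : Int) :
    rs.foldl (fun (st : Int × Int) r => if p r then (st.1 + 1, st.2) else (st.1, st.2 + 1)) (t, f)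
      = (t + rs.foldl (fun t r => if p r then t + 1 else t) 0,
         f + ((rs.length : Int) - rs.foldl (fun t r => if p r then t + 1 else t) 0)) := by
  induction rs generalizing t f with
  | nil => simp
  | cons r rs ih =>
    simp only [List.foldl_cons, List.length_cons]
    rw [foldB_shift rs p (if p r then (0:Int)+1 else 0)]
    split <;> rw [ih] <;> push_cast <;> simp only [Prod.mk.injEq] <;> constructor <;> ring


-- ===== VERDICT (by name: the statement is the Claim_ definition above) =====
theorem literature_signal_confusion_matrix_spec : Claim_equal_literature_signal_confusion_matrix := by
  intro ds rs _
  unfold Spec_literature_signal_confusion_matrix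
  simp only [literature_signal_confusion_matrix, literature_signal_confusion_matrix_alt,
    innerA_eq_any, any_eq_probe, Bool.false_or]
  rw [outerA]
  norm_num
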